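-- pv_equiv track=rewrite | github.com/BatuhanKANBER/YazGelLab-2 | main.py | getlcr
-- ===== SOURCE A (Python) =====
-- def getlcr(n, start, end, s, ci, iswap=False):
--     clr = []
--     for i in range(n):
--         if start <= i <= end:
--             clr.append('gray')
--         else:
--             clr.append('white')
--         if i == end:
--             clr[i] = 'gray'
--         elif i == s:
--             clr[i] = 'black'
--         elif i == ci:
--             clr[i] = 'white'
--         if iswap:
--             if i == s or i == ci:
--                 clr[i] = 'white'
--     return clr
-- ===== SOURCE B (Python) =====
-- def getlcr(n, start, end, s, ci, iswap=False):
--     clr = ['white'] * n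
--     for i in range(max(0, start), min(n, end + 1)):
--         clr[i] = 'gray'
--
--     def put(idx, color):
--         if 0 <= idx < n:
--             clr[idx] = color
--
--     if iswap:
--         put(end, 'gray')
--         put(ci, 'white')
--         put(s, 'white')
--     else:
--         put(ci, 'white')
--         put(s, 'black')
--         put(end, 'gray')
--     return clr
-- ===== Notes on version B (the rewrite author's own statement) =====
-- stated objective: alternative
-- what changed: Instead of growing the list one element at a time and re-assigning the current slot through an elif chain plus an iswap override, B allocates the whole list as white, paints the clamped [start,end] band gray in one range loop, and applies the three targeted overrides (end/s/ci) as guarded writes whose order encodes the precedence (end wins when iswap is False, s/ci win when it is True); per-element branching disappears from the main pass.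
import Mathlib
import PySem

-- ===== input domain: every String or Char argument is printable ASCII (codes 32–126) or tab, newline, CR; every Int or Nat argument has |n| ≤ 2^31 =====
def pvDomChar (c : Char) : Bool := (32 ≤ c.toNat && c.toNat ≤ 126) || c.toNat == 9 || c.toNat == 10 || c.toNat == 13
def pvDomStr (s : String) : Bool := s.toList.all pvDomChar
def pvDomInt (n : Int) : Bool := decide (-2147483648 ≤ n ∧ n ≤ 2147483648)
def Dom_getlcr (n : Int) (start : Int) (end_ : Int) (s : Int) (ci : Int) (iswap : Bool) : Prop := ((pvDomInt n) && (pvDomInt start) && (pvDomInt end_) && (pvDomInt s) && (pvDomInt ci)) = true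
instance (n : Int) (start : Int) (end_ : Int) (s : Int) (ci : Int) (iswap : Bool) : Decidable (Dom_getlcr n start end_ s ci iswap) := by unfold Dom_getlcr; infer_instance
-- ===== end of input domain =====

-- B replaces A's append-and-reassign loop by allocate-white / paint-gray-band / three ordered guarded
-- targeted writes (same O(n) cost, different decomposition); return values proved equal on all inputs.

-- ===== PORT A =====
-- literal transliteration of A: one loop over range(n); append base color, then the elif
-- chain of clr[i] = … assignments, then the iswap override.
def getlcr (n : Int) (start : Int) (end_ : Int) (s : Int) (ci : Int) (iswap : Bool) : List String :=
  (PySem.List.pyRange 0 n 1).foldl (fun clr i =>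
    let clr := clr ++ [if start ≤ i ∧ i ≤ end_ then "gray" else "white"]
    let clr :=
      if i = end_ then PySem.List.pySetD clr i "gray"
      else if i = s then PySem.List.pySetD clr i "black"
      else if i = ci then PySem.List.pySetD clr i "white"
      else clr
    if iswap then
      (if i = s ∨ i = ci then PySem.List.pySetD clr i "white" else clr)
    else clr) []

-- ===== PORT B =====
-- B's guarded setter: write color at idx only when 0 <= idx < n.
def putColor (n : Int) (clr : List String) (idx : Int) (color : String) : List String :=
  if 0 ≤ idx ∧ idx < n then PySem.List.pySetD clr idx color else clr

def getlcr_alt (n : Int) (start : Int) (end_ : Int) (s : Int) (ci : Int) (iswap : Bool) : List String :=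
  let clr := List.replicate n.toNat "white"
  let clr := (PySem.List.pyRange (max 0 start) (min n (end_ + 1)) 1).foldl
      (fun c i => PySem.List.pySetD c i "gray") clr
  if iswap then
    putColor n (putColor n (putColor n clr end_ "gray") ci "white") s "white"
  else
    putColor n (putColor n (putColor n clr ci "white") s "black") end_ "gray"

-- ===== PRECONDITION & SPEC =====
def Spec_getlcr (n : Int) (start : Int) (end_ : Int) (s : Int) (ci : Int) (iswap : Bool) (out : List String) : Prop := out = getlcr_alt n start end_ s ci iswap
instance (n : Int) (start : Int) (end_ : Int) (s : Int) (ci : Int) (iswap : Bool) (out : List String) : Decidable (Spec_getlcr n start end_ s ci iswap out) := by unfold Spec_getlcr; infer_instance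

-- ===== CLAIM (what is proved, stated in full; the proofs are below) =====
def Claim_equal_getlcr : Prop := ∀ (n : Int) (start : Int) (end_ : Int) (s : Int) (ci : Int) (iswap : Bool), Dom_getlcr n start end_ s ci iswap → Spec_getlcr n start end_ s ci iswap (getlcr n start end_ s ci iswap)

-- ===== LEMMAS AND PROOFS =====

-- the final color of position i, read off A's statement order
def colorAt (start end_ s ci : Int) (iswap : Bool) (i : Int) : String :=
  if iswap ∧ (i = s ∨ i = ci) then "white"
  else if i = end_ then "gray"
  else if i = s then "black"
  else if i = ci then "white"
  else if start ≤ i ∧ i ≤ end_ then "gray" else "white"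

theorem set_append_last (l : List String) (x v : String) :
    (l ++ [x]).set l.length v = l ++ [v] := by
  induction l with
  | nil => simp
  | cons a t ih => simp [ih]

theorem stepA_eq (start end_ s ci : Int) (iswap : Bool) (clr : List String) (i : Int)
    (hlen : (clr.length : Int) = i) :
    (let c1 := clr ++ [if start ≤ i ∧ i ≤ end_ then "gray" else "white"]
     let c2 :=
      if i = end_ then PySem.List.pySetD c1 i "gray"
      else if i = s then PySem.List.pySetD c1 i "black"
      else if i = ci then PySem.List.pySetD c1 i "white"
      else c1
     if iswap then
       (if i = s ∨ i = ci then PySem.List.pySetD c2 i "white" else c2)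
     else c2) = clr ++ [colorAt start end_ s ci iswap i] := by
  have h0 : 0 ≤ i := hlen ▸ Int.natCast_nonneg _
  have htoNat : i.toNat = clr.length := by omega
  have hset : ∀ (x v : String), PySem.List.pySetD (clr ++ [x]) i v = clr ++ [v] := by
    intro x v
    rw [PySem.List.pySetD_of_nonneg _ _ h0, htoNat, set_append_last]
  simp only [colorAt]
  split_ifs with h1 h2 h3 h4 h5 h6 h7 h8 h9 h10 h11 h12 h13 h14 h15 h16 h17 h18 <;>
    simp_all

theorem getlcr_eq_map (n start end_ s ci : Int) (iswap : Bool) :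
    ∀ (k : Int) (clr : List String), (clr.length : Int) = k →
    (PySem.List.pyRange k n 1).foldl (fun clr i =>
      let clr := clr ++ [if start ≤ i ∧ i ≤ end_ then "gray" else "white"]
      let clr :=
        if i = end_ then PySem.List.pySetD clr i "gray"
        else if i = s then PySem.List.pySetD clr i "black"
        else if i = ci then PySem.List.pySetD clr i "white"
        else clr
      if iswap then
        (if i = s ∨ i = ci then PySem.List.pySetD clr i "white" else clr)
      else clr) clr
    = clr ++ (PySem.List.pyRange k n 1).map (colorAt start end_ s ci iswap) := by
  intro k clr hlen
  by_cases h : k < n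
  · have : (n - k).toNat = (n - (k+1)).toNat + 1 := by omega
    rw [PySem.List.pyRange_one_cons h]
    simp only [List.foldl_cons, List.map_cons]
    rw [stepA_eq start end_ s ci iswap clr k hlen]
    rw [getlcr_eq_map n start end_ s ci iswap (k+1)
        (clr ++ [colorAt start end_ s ci iswap k]) (by simp [hlen])]
    simp
  · rw [PySem.List.pyRange_one_eq_nil (by omega)]
    simp
termination_by k => (n - k).toNat
decreasing_by omega

theorem paint_length (r : List Int) (l : List String) :
    (r.foldl (fun c i => PySem.List.pySetD c i "gray") l).length = l.length := by
  induction r generalizing l with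
  | nil => rfl
  | cons a t ih => simp [List.foldl_cons, ih, PySem.List.length_pySetD]

theorem paint_getElem? (a b : Int) (l : List String) (ha : 0 ≤ a) (j : Nat) :
    ((PySem.List.pyRange a b 1).foldl (fun c i => PySem.List.pySetD c i "gray") l)[j]?
      = if a ≤ (j : Int) ∧ (j : Int) < b ∧ j < l.length then some "gray" else l[j]? := by
  by_cases h : a < b
  · rw [PySem.List.pyRange_one_cons h]
    simp only [List.foldl_cons]
    rw [PySem.List.pySetD_of_nonneg _ _ ha]
    rw [paint_getElem? (a+1) b _ (by omega) j]
    rw [List.length_set]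
    rw [List.getElem?_set]
    split_ifs <;> first | rfl | omega | (rw [List.getElem?_eq_none (by omega)])
  · rw [PySem.List.pyRange_one_eq_nil (by omega)]
    simp only [List.foldl_nil]
    split_ifs with hc
    · exfalso; omega
    · rfl
termination_by (b - a).toNat
decreasing_by omega

theorem putColor_length (n : Int) (clr : List String) (idx : Int) (v : String) :
    (putColor n clr idx v).length = clr.length := by
  unfold putColor
  split_ifs with h
  · rw [PySem.List.pySetD_of_nonneg _ _ h.1, List.length_set]
  · rfl

theorem putColor_getElem? (n : Int) (clr : List String) (idx : Int) (v : String) (j : Nat)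
    (hlen : (clr.length : Int) = n) (hj : (j : Int) < n) :
    (putColor n clr idx v)[j]? = if idx = (j : Int) then some v else clr[j]? := by
  unfold putColor
  split_ifs with h he he
  · rw [PySem.List.pySetD_of_nonneg _ _ h.1]
    have : idx.toNat = j := by omega
    rw [this, List.getElem?_set_self (by omega)]
  · rw [PySem.List.pySetD_of_nonneg _ _ h.1]
    exact List.getElem?_set_ne (by omega)
  · exfalso; omega
  · rfl

theorem alt_length (n start end_ s ci : Int) (iswap : Bool) :
    (getlcr_alt n start end_ s ci iswap).length = n.toNat := by
  unfold getlcr_alt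
  split_ifs <;>
    simp only [putColor_length, paint_length, List.length_replicate]

theorem alt_getElem? (n start end_ s ci : Int) (iswap : Bool) (j : Nat) (hj : (j : Int) < n) :
    (getlcr_alt n start end_ s ci iswap)[j]? = some (colorAt start end_ s ci iswap j) := by
  have hjn : j < n.toNat := by omega
  have hpl : ((PySem.List.pyRange (max 0 start) (min n (end_ + 1)) 1).foldl
      (fun c i => PySem.List.pySetD c i "gray") (List.replicate n.toNat "white")).length = n.toNat := by
    rw [paint_length, List.length_replicate]
  have hL : (((PySem.List.pyRange (max 0 start) (min n (end_ + 1)) 1).foldl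
      (fun c i => PySem.List.pySetD c i "gray") (List.replicate n.toNat "white")).length : Int) = n := by
    rw [hpl]; omega
  have hpaint := paint_getElem? (max 0 start) (min n (end_ + 1))
      (List.replicate n.toNat "white") (by omega) j
  unfold getlcr_alt
  simp only
  cases iswap with
  | false =>
    rw [if_neg (by simp)]
    rw [putColor_getElem? _ _ _ _ _ (by simp only [putColor_length]; exact hL) hj,
        putColor_getElem? _ _ _ _ _ (by simp only [putColor_length]; exact hL) hj,
        putColor_getElem? _ _ _ _ _ hL hj, hpaint]
    simp only [colorAt, List.length_replicate, List.getElem?_replicate,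
      Bool.false_eq_true, false_and, if_false]
    split_ifs <;> first | rfl | omega
  | true =>
    rw [if_pos rfl]
    rw [putColor_getElem? _ _ _ _ _ (by simp only [putColor_length]; exact hL) hj,
        putColor_getElem? _ _ _ _ _ (by simp only [putColor_length]; exact hL) hj,
        putColor_getElem? _ _ _ _ _ hL hj, hpaint]
    simp only [colorAt, List.length_replicate, List.getElem?_replicate, true_and]
    split_ifs <;> first | rfl | omega

-- ===== VERDICT (by name: the statement is the Claim_ definition above) =====
theorem getlcr_spec : Claim_equal_getlcr := by
  intro n start end_ s ci iswap _
  unfold Spec_getlcr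
  unfold getlcr
  rw [getlcr_eq_map n start end_ s ci iswap 0 [] (by simp)]
  simp only [List.nil_append]
  apply List.ext_getElem?
  intro j
  by_cases hj : (j : Int) < n
  · rw [alt_getElem? n start end_ s ci iswap j hj]
    have hjlen : j < ((PySem.List.pyRange 0 n 1).map (colorAt start end_ s ci iswap)).length := by
      simp [PySem.List.length_pyRange_one]; omega
    rw [List.getElem?_eq_getElem hjlen]
    simp [PySem.List.getElem_pyRange_one]
  · rw [List.getElem?_eq_none, List.getElem?_eq_none]
    · rw [alt_length]; omega
    · simp [PySem.List.length_pyRange_one]; omega
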